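-- pv_equiv track=rewrite | github.com/huishenlab/tranquillyzer_manuscript_code | benchmarking/sicelore/collect_benchmarking_metrics.py | get_original_name
-- ===== SOURCE A (Python) =====
-- def get_original_name(name):
--     """Get original read name from sicelore mangled name
--
--     Inputs -
--         name - str
--     Returns -
--         str
--     """
--     pieces = name.split('_')
--
--     out = []
--     for piece in pieces:
--         start = piece[:2]
--         if start in ['RE', 'FW', 'FA', 'FT', 'RA', 'RT']:
--             break
--
--         out.append(piece)
--
--     return '_'.join(out)
-- ===== SOURCE B (Python) =====
-- TAGS = ('RE', 'FW', 'FA', 'FT', 'RA', 'RT')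
--
--
-- def get_original_name(name):
--     """Get original read name from sicelore mangled name
--
--     Single left-to-right scan: cut the name at the first position that
--     starts a tag piece (start of string, or an underscore followed by a
--     two-char tag); no piece list is built.
--     """
--     if name[:2] in TAGS:
--         return ''
--     for i, c in enumerate(name):
--         if c == '_' and name[i + 1:i + 3] in TAGS:
--             return name[:i]
--     return name
-- ===== Notes on version B (the rewrite author's own statement) =====
-- stated objective: simpler
-- what changed: A splits the name on '_', accumulates pieces until one starts with a tag, and re-joins them; B never builds a piece list: it scans the name once and cuts it at the first tag boundary (start of string, or an underscore followed by a two-char tag).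
import Mathlib
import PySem

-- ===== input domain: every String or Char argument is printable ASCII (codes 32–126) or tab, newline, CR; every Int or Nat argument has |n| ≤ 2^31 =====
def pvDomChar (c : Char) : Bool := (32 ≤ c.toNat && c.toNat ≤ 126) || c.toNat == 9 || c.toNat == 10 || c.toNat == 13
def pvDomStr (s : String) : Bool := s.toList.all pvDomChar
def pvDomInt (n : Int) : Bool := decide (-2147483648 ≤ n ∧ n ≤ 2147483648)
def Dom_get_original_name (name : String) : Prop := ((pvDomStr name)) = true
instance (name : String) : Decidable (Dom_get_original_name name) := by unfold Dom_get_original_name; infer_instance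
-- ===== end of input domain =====

-- B replaces A's split-into-pieces / accumulate-until-tag / re-join by a single
-- left-to-right scan that cuts the name at the first tag boundary (objective: simpler).

-- the six sicelore suffix tags, shared literal data of both programs
def pvTags : List (List Char) := [['R','E'],['F','W'],['F','A'],['F','T'],['R','A'],['R','T']]

-- ===== PORT A =====
-- A's for-loop with break: collect pieces until one starts with a tag
def pvLoopA : List (List Char) → List (List Char) → List (List Char)
  | [], out => out
  | p :: ps, out =>
      if pvTags.contains (PySem.List.slice p none (some 2)) then out
      else pvLoopA ps (out ++ [p])

def get_original_name (name : String) : String :=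
  String.ofList (PySem.Chars.join ['_'] (pvLoopA (PySem.Chars.splitOn name.toList ['_']) []))

-- ===== PORT B =====
-- Source B's enumerate scan: cut before the first '_' that is followed by a tag
def pvBeforeTag : List Char → List Char
  | [] => []
  | c :: rest =>
      if c = '_' ∧ pvTags.contains (PySem.List.slice rest none (some 2)) then []
      else c :: pvBeforeTag rest

def get_original_name_alt (name : String) : String :=
  if pvTags.contains (PySem.List.slice name.toList none (some 2)) then ""
  else String.ofList (pvBeforeTag name.toList)

-- ===== PRECONDITION & SPEC =====
def Spec_get_original_name (name : String) (out : String) : Prop := out = get_original_name_alt name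
instance (name : String) (out : String) : Decidable (Spec_get_original_name name out) := by unfold Spec_get_original_name; infer_instance

-- ===== CLAIM (what is proved, stated in full; the proofs are below) =====
def Claim_equal_get_original_name : Prop := ∀ (name : String), Dom_get_original_name name → Spec_get_original_name name (get_original_name name)

-- ===== LEMMAS AND PROOFS =====

-- [:2] on a list is take 2
theorem pv_slice_two (l : List Char) : PySem.List.slice l none (some 2) = l.take 2 := by
  simp [PySem.List.slice]

-- proof-side model of Python's split('_')
def splitU : List Char → List (List Char)
  | [] => [[]]
  | c :: t =>
      if c = '_' then [] :: splitU t
      else match splitU t with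
           | h :: r => (c :: h) :: r
           | [] => [[c]]

theorem splitU_ne_nil : ∀ t, splitU t ≠ [] := by
  intro t
  induction t with
  | nil => simp [splitU]
  | cons c t ih =>
    simp only [splitU]
    split
    · simp
    · split
      · simp
      · simp

-- PySem's splitOn.go computed in terms of splitU
theorem goG : ∀ (fuel : Nat) (l cur : List Char) (acc : List (List Char)) (h : List Char)
    (r : List (List Char)), l.length ≤ fuel → splitU l = h :: r →
    PySem.Chars.splitOn.go ['_'] fuel l cur acc = acc.reverse ++ (cur.reverse ++ h) :: r := by
  intro fuel
  induction fuel with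
  | zero =>
    intro l cur acc h r hl hs
    interval_cases hll : l.length
    all_goals (match l, hll with | [], _ => ?_)
    simp [splitU] at hs
    obtain ⟨rfl, rfl⟩ := hs
    simp [PySem.Chars.splitOn.go]
  | succ f ih =>
    intro l cur acc h r hl hs
    match l with
    | [] =>
      simp [splitU] at hs
      obtain ⟨rfl, rfl⟩ := hs
      simp [PySem.Chars.splitOn.go]
    | c :: rest =>
      cases hru : splitU rest with
      | nil => exact absurd hru (splitU_ne_nil rest)
      | cons h1 r1 =>
        by_cases hc : c = '_'
        · subst hc
          rw [show splitU ('_' :: rest) = [] :: h1 :: r1 from by simp [splitU, hru]] at hs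
          injection hs with e1 e2
          subst e1; subst e2
          rw [show PySem.Chars.splitOn.go ['_'] (f+1) ('_'::rest) cur acc
                = PySem.Chars.splitOn.go ['_'] f rest [] (cur.reverse :: acc) from by
              simp [PySem.Chars.splitOn.go]]
          rw [ih rest [] (cur.reverse :: acc) h1 r1 (by simpa using hl) hru]
          simp
        · rw [show splitU (c :: rest) = (c :: h1) :: r1 from by simp [splitU, hc, hru]] at hs
          injection hs with e1 e2
          subst e1; subst e2
          rw [show PySem.Chars.splitOn.go ['_'] (f+1) (c::rest) cur acc
                = PySem.Chars.splitOn.go ['_'] f rest (c :: cur) acc from by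
              simp [PySem.Chars.splitOn.go, List.isPrefixOf, Ne.symm hc]]
          rw [ih rest (c :: cur) acc h1 r1 (by simpa using hl) hru]
          simp

theorem splitOn_eq_splitU (s : List Char) (h : List Char) (r : List (List Char))
    (hs : splitU s = h :: r) : PySem.Chars.splitOn s ['_'] = h :: r := by
  have := goG (s.length + 1) s [] [] h r (by omega) hs
  simpa [PySem.Chars.splitOn] using this

-- the first piece starts with a tag iff the whole string does
-- (no tag starts with '_', has length < 2, or has '_' as its second character)
theorem pv_first_piece_tag : ∀ (t h : List Char) (r : List (List Char)), splitU t = h :: r →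
    ((t.take 2 ∈ pvTags) ↔ (h.take 2 ∈ pvTags)) := by
  intro t h r hs
  match t with
  | [] =>
    rw [show splitU ([] : List Char) = [[]] from rfl] at hs
    injection hs with e1 _; subst e1; rfl
  | '_' :: t' =>
    cases hru : splitU t' with
    | nil => exact absurd hru (splitU_ne_nil t')
    | cons h1 r1 =>
      rw [show splitU ('_' :: t') = [] :: h1 :: r1 from by simp [splitU, hru]] at hs
      injection hs with e1 _; subst e1
      cases t' with
      | nil => simp [pvTags]
      | cons d t'' => simp [pvTags]
  | c :: t' =>
    by_cases hc : c = '_'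
    · subst hc
      cases hru : splitU t' with
      | nil => exact absurd hru (splitU_ne_nil t')
      | cons h1 r1 =>
        rw [show splitU ('_' :: t') = [] :: h1 :: r1 from by simp [splitU, hru]] at hs
        injection hs with e1 _; subst e1
        cases t' with
        | nil => simp [pvTags]
        | cons d t'' => simp [pvTags]
    · cases hru : splitU t' with
      | nil => exact absurd hru (splitU_ne_nil t')
      | cons h1 r1 =>
        rw [show splitU (c :: t') = (c :: h1) :: r1 from by simp [splitU, hc, hru]] at hs
        injection hs with e1 _; subst e1
        match t' with
        | [] =>
          rw [show splitU ([] : List Char) = [[]] from rfl] at hru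
          injection hru with e1 _; subst e1
          simp
        | d :: t'' =>
          by_cases hd : d = '_'
          · subst hd
            cases hru2 : splitU t'' with
            | nil => exact absurd hru2 (splitU_ne_nil t'')
            | cons h2 r2 =>
              rw [show splitU ('_' :: t'') = [] :: h2 :: r2 from by simp [splitU, hru2]] at hru
              injection hru with e1 _; subst e1
              simp [pvTags]
          · cases hru2 : splitU t'' with
            | nil => exact absurd hru2 (splitU_ne_nil t'')
            | cons h2 r2 =>
              rw [show splitU (d :: t'') = (d :: h2) :: r2 from by simp [splitU, hd, hru2]] at hru
              injection hru with e1 _; subst e1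
              simp

-- A's loop is takeWhile
theorem pvLoopA_eq : ∀ (ps out : List (List Char)),
    pvLoopA ps out = out ++ ps.takeWhile (fun p => !decide (p.take 2 ∈ pvTags)) := by
  intro ps
  induction ps with
  | nil => intro out; simp [pvLoopA]
  | cons p ps ih =>
    intro out
    by_cases hp : p.take 2 ∈ pvTags
    · simp [pvLoopA, pv_slice_two, hp]
    · simp [pvLoopA, pv_slice_two, hp, ih]

-- what '_'.join contributes after the first kept piece
def brkTail : List (List Char) → List Char
  | [] => []
  | p :: ps => if p.take 2 ∈ pvTags then [] else '_' :: (p ++ brkTail ps)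

theorem join_takeWhile_eq_brkTail : ∀ (ps : List (List Char)) (p : List Char),
    PySem.Chars.join ['_'] (p :: ps.takeWhile (fun q => !decide (q.take 2 ∈ pvTags)))
      = p ++ brkTail ps := by
  intro ps
  induction ps with
  | nil => intro p; simp [brkTail, PySem.Chars.join_singleton]
  | cons q ps ih =>
    intro p
    by_cases hq : q.take 2 ∈ pvTags
    · simp [hq, brkTail, PySem.Chars.join_singleton]
    · have ht : List.takeWhile (fun q => !decide (q.take 2 ∈ pvTags)) (q :: ps)
          = q :: List.takeWhile (fun q => !decide (q.take 2 ∈ pvTags)) ps := by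
        simp [hq]
      have hstep : PySem.Chars.join ['_']
            (p :: q :: List.takeWhile (fun q => !decide (q.take 2 ∈ pvTags)) ps)
          = p ++ '_' :: PySem.Chars.join ['_']
            (q :: List.takeWhile (fun q => !decide (q.take 2 ∈ pvTags)) ps) := by
        simp [PySem.Chars.join_cons_cons]
      rw [ht, hstep, ih q]
      simp [brkTail, hq]

-- B's scan equals "first piece ++ brkTail of the remaining pieces"
theorem pvBeforeTag_eq : ∀ (t h : List Char) (r : List (List Char)), splitU t = h :: r →
    pvBeforeTag t = h ++ brkTail r := by
  intro t
  induction t with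
  | nil =>
    intro h r hs
    rw [show splitU ([] : List Char) = [[]] from rfl] at hs
    injection hs with e1 e2; subst e1; subst e2
    simp [pvBeforeTag, brkTail]
  | cons c t ih =>
    intro h r hs
    cases hru : splitU t with
    | nil => exact absurd hru (splitU_ne_nil t)
    | cons h1 r1 =>
      by_cases hc : c = '_'
      · subst hc
        rw [show splitU ('_' :: t) = [] :: h1 :: r1 from by simp [splitU, hru]] at hs
        injection hs with e1 e2; subst e1; subst e2
        have hS := pv_first_piece_tag t h1 r1 hru
        by_cases ht : t.take 2 ∈ pvTags
        · have hh1 : h1.take 2 ∈ pvTags := hS.mp ht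
          simp [pvBeforeTag, pv_slice_two, ht, brkTail, hh1]
        · have hh1 : ¬ h1.take 2 ∈ pvTags := fun hx => ht (hS.mpr hx)
          simp [pvBeforeTag, pv_slice_two, ht, brkTail, hh1, ih h1 r1 hru]
      · rw [show splitU (c :: t) = (c :: h1) :: r1 from by simp [splitU, hc, hru]] at hs
        injection hs with e1 e2; subst e1; subst e2
        simp [pvBeforeTag, pv_slice_two, hc, ih h1 r1 hru]

-- ===== VERDICT (by name: the statement is the Claim_ definition above) =====
theorem get_original_name_spec : Claim_equal_get_original_name := by
  unfold Claim_equal_get_original_name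
  intro name _
  unfold Spec_get_original_name get_original_name get_original_name_alt
  simp only [pv_slice_two]
  cases hs : splitU name.toList with
  | nil => exact absurd hs (splitU_ne_nil _)
  | cons h r =>
    rw [splitOn_eq_splitU name.toList h r hs]
    rw [pvLoopA_eq (h :: r) []]
    have hS := pv_first_piece_tag name.toList h r hs
    by_cases hh : h.take 2 ∈ pvTags
    · rw [if_pos (show pvTags.contains (name.toList.take 2) = true by
        simp [hS.mpr hh])]
      simp [hh, PySem.Chars.join_nil]
    · rw [if_neg (show ¬ pvTags.contains (name.toList.take 2) = true by
        simp
        exact fun hx => hh (hS.mp hx))]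
      have htw : List.takeWhile (fun p => !decide (p.take 2 ∈ pvTags)) (h :: r)
          = h :: List.takeWhile (fun p => !decide (p.take 2 ∈ pvTags)) r := by
        simp [hh]
      rw [List.nil_append, htw, join_takeWhile_eq_brkTail r h,
        ← pvBeforeTag_eq name.toList h r hs]
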